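-- pv_equiv track=rewrite | github.com/hhtttttiger/RAG-Ready | rag_ready/parser/azure_di/merge_table.py | _remove_header_from_markdown_table
-- ===== SOURCE A (Python) =====
-- def _remove_header_from_markdown_table(markdown_table):
--     HEADER_CHARS = set("-:| +")
--     result = ""
--     lines = markdown_table.splitlines()
--     header_removed = False
--     for line in lines:
--         stripped = line.strip()
--         if not header_removed and stripped and all(c in HEADER_CHARS for c in stripped):
--             header_removed = True
--             continue
--         tokens = [t.strip() for t in stripped.split("|") if t.strip() != ""]
--         if not header_removed and tokens and all(set(t) <= set("-:") for t in tokens):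
--             header_removed = True
--             continue
--         result += f"{line}\n"
--     return result
-- ===== SOURCE B (Python) =====
-- def _remove_header_from_markdown_table(markdown_table):
--     def is_separator(line):
--         s = line.strip()
--         if s and set(s) <= set("-:| +"):
--             return True
--         tokens = [t for t in (p.strip() for p in s.split("|")) if t]
--         return bool(tokens) and set("".join(tokens)) <= set("-:")
--
--     def keep(lines):
--         # structural recursion: when the separator is found, return the rest wholesale
--         if not lines:
--             return []
--         if is_separator(lines[0]):
--             return lines[1:]
--         return [lines[0]] + keep(lines[1:])
--
--     return "".join(l + "\n" for l in keep(markdown_table.splitlines()))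
-- ===== Notes on version B (the rewrite author's own statement) =====
-- stated objective: alternative
-- what changed: Replaces A's stateful flag loop with string += by a flagless structural recursion that returns the remaining lines wholesale once the first separator is found, a set-inclusion formulation of the separator predicate (including one joined-token subset test instead of a per-token all()), and a final join over the kept-lines list.
import Mathlib
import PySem

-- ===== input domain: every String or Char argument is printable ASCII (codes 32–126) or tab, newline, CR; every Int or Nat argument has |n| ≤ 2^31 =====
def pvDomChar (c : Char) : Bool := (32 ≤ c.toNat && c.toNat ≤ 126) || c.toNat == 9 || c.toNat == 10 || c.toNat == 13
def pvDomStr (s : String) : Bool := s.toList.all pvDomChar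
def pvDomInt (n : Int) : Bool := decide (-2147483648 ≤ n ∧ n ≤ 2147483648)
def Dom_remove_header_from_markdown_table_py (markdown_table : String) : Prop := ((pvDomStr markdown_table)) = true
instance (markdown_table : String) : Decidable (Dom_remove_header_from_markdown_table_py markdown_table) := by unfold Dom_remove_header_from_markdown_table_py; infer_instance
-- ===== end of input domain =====

-- B replaces A's stateful flag loop (string +=) by a flagless structural recursion that returns the
-- remaining lines wholesale at the first separator, with a set-inclusion separator predicate (objective: alternative).

-- ===== PORT A =====
-- loop body of A's for-loop: state = (result, header_removed)
def pvStepA (st : String × Bool) (line : String) : String × Bool :=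
  let stripped := PySem.Str.strip line
  if !st.2 && stripped != "" && stripped.toList.all (fun c => ['-', ':', '|', ' ', '+'].contains c) then
    (st.1, true)
  else
    let tokens := (((PySem.Str.split? stripped "|").getD []).map PySem.Str.strip).filter (fun t => t != "")
    if !st.2 && tokens != [] && tokens.all (fun t => t.toList.all (fun c => ['-', ':'].contains c)) then
      (st.1, true)
    else
      (st.1 ++ line ++ "\n", st.2)

def remove_header_from_markdown_table_py (markdown_table : String) : String :=
  ((PySem.Str.splitlines markdown_table).foldl pvStepA ("", false)).1

-- ===== PORT B =====
-- B's is_separator helper (set-inclusion formulation)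
def pvIsSeparatorB (line : String) : Bool :=
  let s := PySem.Str.strip line
  if s != "" && PySem.Set.issubset (PySem.Set.ofList s.toList) (PySem.Set.ofList ['-', ':', '|', ' ', '+']) then
    true
  else
    let tokens := (((PySem.Str.split? s "|").getD []).map PySem.Str.strip).filter (fun t => t != "")
    tokens != [] && PySem.Set.issubset (PySem.Set.ofList (PySem.Str.join "" tokens).toList) (PySem.Set.ofList ['-', ':'])

-- B's keep: structural recursion, returns the rest wholesale at the first separator
def pvKeep : List String → List String
  | [] => []
  | h :: rest => if pvIsSeparatorB h then rest else h :: pvKeep rest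

def remove_header_from_markdown_table_py_alt (markdown_table : String) : String :=
  PySem.Str.join "" ((pvKeep (PySem.Str.splitlines markdown_table)).map (fun l => l ++ "\n"))

-- ===== PRECONDITION & SPEC =====
def Spec_remove_header_from_markdown_table_py (markdown_table : String) (out : String) : Prop := out = remove_header_from_markdown_table_py_alt markdown_table
instance (markdown_table : String) (out : String) : Decidable (Spec_remove_header_from_markdown_table_py markdown_table out) := by unfold Spec_remove_header_from_markdown_table_py; infer_instance

-- ===== CLAIM =====
def Claim_equal_remove_header_from_markdown_table_py : Prop := ∀ (markdown_table : String), Dom_remove_header_from_markdown_table_py markdown_table → Spec_remove_header_from_markdown_table_py markdown_table (remove_header_from_markdown_table_py markdown_table)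

-- ===== LEMMAS AND PROOFS =====

theorem pv_join_cons (a : String) (l : List String) :
    PySem.Str.join "" (a :: l) = a ++ PySem.Str.join "" l := by
  apply String.ext
  cases l with
  | nil => simp [PySem.Str.toList_join]
  | cons b tl => simp [PySem.Str.toList_join, PySem.Chars.join_cons_cons]

-- set(cs) <= set(l) is the same boolean as "every char of cs is in l"
theorem pv_subset_eq_all (cs l : List Char) :
    PySem.Set.issubset (PySem.Set.ofList cs) (PySem.Set.ofList l) = cs.all (fun c => l.contains c) := by
  rw [Bool.eq_iff_iff, PySem.Set.issubset_iff, List.all_eq_true]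
  constructor
  · intro h c hc
    have := h c (by simpa [PySem.Set.mem_ofList] using hc)
    simpa [PySem.Set.mem_ofList] using this
  · intro h c hc
    have := h c (by simpa [PySem.Set.mem_ofList] using hc)
    simpa [PySem.Set.mem_ofList] using this

-- per-token char check = char check of the joined tokens
theorem pv_all_join (ts : List String) (p : Char → Bool) :
    (PySem.Str.join "" ts).toList.all p = ts.all (fun t => t.toList.all p) := by
  induction ts with
  | nil => simp [show PySem.Str.join "" ([]:List String) = "" from rfl]
  | cons a tl ih =>
    rw [pv_join_cons]
    simp only [PySem.Str.toList_join, show ("" : String).toList = ([] : List Char) from rfl] at ih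
    simp [ih]

-- B's predicate decides exactly A's skip condition when the flag is clear
theorem pvStepA_false (res line : String) :
    pvStepA (res, false) line =
      if pvIsSeparatorB line then (res, true) else (res ++ line ++ "\n", false) := by
  simp only [pvStepA, pvIsSeparatorB, Bool.not_false, Bool.true_and,
    pv_subset_eq_all, pv_all_join]
  cases h1 : (PySem.Str.strip line != "" &&
      (PySem.Str.strip line).toList.all (fun c => ['-', ':', '|', ' ', '+'].contains c)) with
  | true => simp
  | false =>
    cases h2 : (((((PySem.Str.split? (PySem.Str.strip line) "|").getD []).map
        PySem.Str.strip).filter (fun t => t != "")) != [] &&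
        ((((PySem.Str.split? (PySem.Str.strip line) "|").getD []).map
        PySem.Str.strip).filter (fun t => t != "")).all
          (fun t => t.toList.all (fun c => ['-', ':'].contains c))) with
    | true => simp
    | false => simp

-- A's step with the flag set just appends the line
theorem pvStepA_true (res line : String) :
    pvStepA (res, true) line = (res ++ line ++ "\n", true) := by
  simp [pvStepA]

-- once the flag is set, A appends every remaining line
theorem pv_foldl_true (lines : List String) (res : String) :
    (lines.foldl pvStepA (res, true)).1 = res ++ PySem.Str.join "" (lines.map (fun l => l ++ "\n")) := by
  induction lines generalizing res with
  | nil => simp [show PySem.Str.join "" ([]:List String) = "" from rfl]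
  | cons a tl ih =>
    simp only [List.foldl_cons, pvStepA_true, List.map_cons, pv_join_cons, ih,
      String.append_assoc]

-- main loop invariant: A's fold with flag clear = prefix ++ join of B's kept lines
theorem pv_foldl_false (lines : List String) (res : String) :
    (lines.foldl pvStepA (res, false)).1 =
      res ++ PySem.Str.join "" ((pvKeep lines).map (fun l => l ++ "\n")) := by
  induction lines generalizing res with
  | nil => simp [pvKeep, show PySem.Str.join "" ([]:List String) = "" from rfl]
  | cons a tl ih =>
    simp only [List.foldl_cons, pvStepA_false, pvKeep]
    by_cases h : pvIsSeparatorB a = true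
    · simp [h, pv_foldl_true]
    · simp only [Bool.not_eq_true] at h
      simp only [h, Bool.false_eq_true, if_false]
      rw [ih]
      simp [pv_join_cons, String.append_assoc]

-- ===== VERDICT =====
theorem remove_header_from_markdown_table_py_spec : Claim_equal_remove_header_from_markdown_table_py := by
  intro markdown_table _
  unfold Spec_remove_header_from_markdown_table_py
  unfold remove_header_from_markdown_table_py remove_header_from_markdown_table_py_alt
  rw [pv_foldl_false]
  apply String.ext
  simp [PySem.Str.toList_join]
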